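-- pv_equiv track=rewrite | github.com/FadedCosine/Syntax-guided-Chinese-NER | processors/dependency_parsing.py | build_leaves_list
-- ===== SOURCE A (Python) =====
-- from queue import Queue
--
-- def build_leaves_list(head_list):
--     """构建每个lexicon下的叶子list
--
--     Args:
--         head_list (list of int): [每个lexicon在句法依存树中的父节点idx]]
--
--     Returns:
--         [ [leaves_list1], [leaves_list2], ... ]: 即每个lexicon在句法依存树中结点所包含的叶子list
--     """
--     # tree_list[i] 表示[i]个lexicon的子节点idx， 树节点的编号从1开始。虚拟的root编号为0，所以是 len(head_list) + 1
--     tree_list = [[] for i in range(len(head_list) + 1)]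
--     for cur, parent in enumerate(head_list):
--         tree_list[parent].append(cur + 1)
--     #而后做一个逆的层次遍历，也就是从叶子节点向上进行层次遍历
--     #先用正常的层次遍历，得到从上到小的内部节点，再reverse
--     que = Queue()
--     que.put(0)
--     level_tree_list = []
--     leaves_list = [[] for i in range(len(head_list) + 1)]
--     while not que.empty():
--         cur = que.get()
--         if len(tree_list[cur]) > 0:
--             for i in tree_list[cur]:
--                 que.put(i)
--             level_tree_list.append(cur)
--         #每个lexicon都要关注它本身, 但是这种写法会让上层结点关注所有子树结点
--         # leaves_list[cur].append(cur)
--         else: #叶子，叶子结点的lexicon覆盖的范围就是它本身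
--             leaves_list[cur].append(cur)
--     level_tree_list.reverse()
--     # 此时level_tree_list则存着从最底层的内部节点向上到根节点的层次遍历
--     for node in level_tree_list:
--         for i in tree_list[node]: #把当前结点的子结点的leaf_list加入当前结点即可
--             leaves_list[node].extend(leaves_list[i])
--     # 每个结点还要关注其本身
--     for node in level_tree_list:
--         leaves_list[node].append(node)
--
--     # 不返回idx为0的根节点的 leaf_list
--     return [leaf_list for leaf_list in leaves_list[1:]]
-- ===== SOURCE B (Python) =====
-- def build_leaves_list(head_list):
--     """Same result as the original: for each node 1..n, the DFS-ordered list of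
--     leaves of its subtree (plus the node itself for reachable nodes), computed
--     by a single iterative post-order DFS instead of BFS + reverse + two passes."""
--     n = len(head_list)
--     children = [[] for _ in range(n + 1)]
--     for cur, parent in enumerate(head_list):
--         children[parent].append(cur + 1)
--     up = [[] for _ in range(n + 1)]   # value a node passes to its parent (leaf ids only)
--     out = [[] for _ in range(n + 1)]  # final answer slot per node
--     stack = [(0, False)]
--     while stack:
--         node, expanded = stack.pop()
--         if not expanded:
--             stack.append((node, True))
--             for c in reversed(children[node]):
--                 stack.append((c, False))
--         elif children[node]:
--             acc = []
--             for c in children[node]: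
--                 acc += up[c]
--             up[node] = acc
--             out[node] = acc + [node]
--         else:
--             up[node] = [node]
--             out[node] = [node]
--     return out[1:]
-- ===== Notes on version B (the rewrite author's own statement) =====
-- stated objective: simpler
-- what changed: Replaced the BFS level-order pass plus reverse plus two separate propagation loops with a single explicit-stack post-order DFS that computes each node's leaf list in one pass, storing the leaves-plus-self answer locally while passing only the leaf ids upward.
import Mathlib
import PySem

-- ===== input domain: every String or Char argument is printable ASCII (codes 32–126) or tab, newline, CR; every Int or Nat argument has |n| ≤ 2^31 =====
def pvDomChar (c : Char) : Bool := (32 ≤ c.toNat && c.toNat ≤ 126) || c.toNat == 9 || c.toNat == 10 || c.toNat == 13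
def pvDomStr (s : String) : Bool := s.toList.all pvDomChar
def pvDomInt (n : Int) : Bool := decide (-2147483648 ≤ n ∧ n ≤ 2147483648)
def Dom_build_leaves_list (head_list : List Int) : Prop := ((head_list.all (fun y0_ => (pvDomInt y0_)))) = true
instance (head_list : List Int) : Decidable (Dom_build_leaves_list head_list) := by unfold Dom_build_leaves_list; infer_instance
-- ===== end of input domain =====

-- B replaces A's BFS + reverse + two propagation loops by one explicit-stack
-- post-order DFS; same return value (return-value equivalence; neither mutates its argument).

-- Python list index (possibly negative), as both Pythons apply it to a list of length m
def pvIdx (m : Nat) (i : Int) : Nat := (if i < 0 then i + (m : Int) else i).toNat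

-- shared by both ports: both Pythons build the children table with the identical loop
-- `for cur, parent in enumerate(head_list): tree_list[parent].append(cur + 1)`
def pvBuildTree (head_list : List Int) : List (List Int) :=
  head_list.zipIdx.foldl
    (fun tl pc =>
      let j := pvIdx (head_list.length + 1) pc.1
      tl.set j ((tl.getD j []) ++ [((pc.2 : Int) + 1)]))
    (List.replicate (head_list.length + 1) ([] : List Int))

-- ===== PORT A =====
-- the BFS while-loop (fuel n+1 = its exact maximal iteration count: each node is dequeued at most once)
def pvBFS (tree : List (List Int)) : Nat → List Int → List Int → List (List Int) → List Int × List (List Int)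
  | 0, _, lvl, lv => (lvl, lv)
  | _ + 1, [], lvl, lv => (lvl, lv)
  | fuel + 1, cur :: rest, lvl, lv =>
    let cs := tree.getD cur.toNat []
    if cs.length > 0 then
      pvBFS tree fuel (rest ++ cs) (lvl ++ [cur]) lv
    else
      pvBFS tree fuel rest lvl (lv.set cur.toNat ((lv.getD cur.toNat []) ++ [cur]))

-- `for i in tree_list[node]: leaves_list[node].extend(leaves_list[i])`
def pvExtend (tree : List (List Int)) (lv : List (List Int)) (node : Int) : List (List Int) :=
  (tree.getD node.toNat []).foldl
    (fun lv i => lv.set node.toNat ((lv.getD node.toNat []) ++ (lv.getD i.toNat []))) lv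

def build_leaves_list (head_list : List Int) : List (List Int) :=
  let n := head_list.length
  let tree := pvBuildTree head_list
  let r := pvBFS tree (n + 1) [0] [] (List.replicate (n + 1) ([] : List Int))
  let lvlr := r.1.reverse
  let lv1 := lvlr.foldl (pvExtend tree) r.2
  let lv2 := lvlr.foldl (fun lv node => lv.set node.toNat ((lv.getD node.toNat []) ++ [node])) lv1
  lv2.drop 1

-- ===== PORT B =====
-- the explicit-stack post-order DFS loop of Source B (head of the list = top of the stack;
-- fuel 2n+2 = its exact maximal iteration count: each node is popped at most twice)
def pvDFS (children : List (List Int)) : Nat → List (Int × Bool) → List (List Int) → List (List Int) → List (List Int) × List (List Int)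
  | 0, _, up, out => (up, out)
  | _ + 1, [], up, out => (up, out)
  | fuel + 1, (node, expanded) :: stack, up, out =>
    if expanded then
      let cs := children.getD node.toNat []
      if cs.length > 0 then
        let acc := cs.foldl (fun acc c => acc ++ up.getD c.toNat []) []
        pvDFS children fuel stack (up.set node.toNat acc) (out.set node.toNat (acc ++ [node]))
      else
        pvDFS children fuel stack (up.set node.toNat [node]) (out.set node.toNat [node])
    else
      pvDFS children fuel
        ((children.getD node.toNat []).reverse.foldl (fun st c => (c, false) :: st) ((node, true) :: stack))
        up out

def build_leaves_list_alt (head_list : List Int) : List (List Int) :=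
  let n := head_list.length
  let children := pvBuildTree head_list
  let r := pvDFS children (2 * n + 2) [((0 : Int), false)]
      (List.replicate (n + 1) ([] : List Int)) (List.replicate (n + 1) ([] : List Int))
  r.2.drop 1

-- ===== PRECONDITION & SPEC =====
-- Pre_: exactly the inputs on which the Python A returns normally; a parent outside
-- [-(n+1), n] makes `tree_list[parent]` raise IndexError in both Pythons.
def Pre_build_leaves_list (head_list : List Int) : Prop :=
  ∀ p ∈ head_list, -((head_list.length : Int) + 1) ≤ p ∧ p ≤ (head_list.length : Int)
instance (head_list : List Int) : Decidable (Pre_build_leaves_list head_list) := by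
  unfold Pre_build_leaves_list; infer_instance

def pvWitness_build_leaves_list : List Int := [0, 0, 2]

def Spec_build_leaves_list (head_list : List Int) (out : List (List Int)) : Prop := out = build_leaves_list_alt head_list
instance (head_list : List Int) (out : List (List Int)) : Decidable (Spec_build_leaves_list head_list out) := by unfold Spec_build_leaves_list; infer_instance

-- ===== CLAIM (what is proved, stated in full; the proofs are below) =====
def Claim_equal_build_leaves_list : Prop := ∀ (head_list : List Int), Dom_build_leaves_list head_list → Pre_build_leaves_list head_list → Spec_build_leaves_list head_list (build_leaves_list head_list)

-- ===== LEMMAS AND PROOFS =====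

-- abbreviations (proof-side only)
def pvM (hl : List Int) : Nat := hl.length + 1

-- parent function on node ids 0..n (0 is the absorbing virtual root)
def parN (hl : List Int) (v : Nat) : Nat :=
  if v = 0 then 0 else pvIdx (pvM hl) (hl.getD (v - 1) 0)

def Reach (hl : List Int) (v : Nat) : Prop := ∃ k, (parN hl)^[k] v = 0

noncomputable def dep (hl : List Int) (v : Nat) : Nat :=
  @dite _ (Reach hl v) (Classical.propDecidable _) (fun h => Nat.find h) (fun _ => pvM hl + 1)

def chI (hl : List Int) (v : Nat) : List Int := (pvBuildTree hl).getD v []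
def chN (hl : List Int) (v : Nat) : List Nat := (chI hl v).map Int.toNat

-- leaf list passed upward, with fuel
def subF (hl : List Int) : Nat → Nat → List Int
  | 0, _ => []
  | f + 1, v => if chN hl v = [] then [(v : Int)] else ((chN hl v).map (subF hl f)).flatten

-- subtree node list, with fuel
def stF (hl : List Int) : Nat → Nat → List Nat
  | 0, _ => []
  | f + 1, v => v :: ((chN hl v).map (stF hl f)).flatten

noncomputable def Fv (hl : List Int) (v : Nat) : Nat := pvM hl - dep hl v
noncomputable def LvS (hl : List Int) (v : Nat) : List Int := subF hl (Fv hl v) v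
noncomputable def stS (hl : List Int) (v : Nat) : List Nat := stF hl (Fv hl v) v
noncomputable def szS (hl : List Int) (v : Nat) : Nat := (stS hl v).length


-- ---------- basic list lemmas ----------
theorem pv_getD_set_self {α : Type} (l : List α) (j : Nat) (x d : α) (h : j < l.length) :
    (l.set j x).getD j d = x := by
  simp [List.getD_eq_getElem?_getD, List.getElem?_set, h]

theorem pv_getD_set_ne {α : Type} (l : List α) (i j : Nat) (x d : α) (h : i ≠ j) :
    (l.set j x).getD i d = l.getD i d := by
  simp [List.getD_eq_getElem?_getD, List.getElem?_set, (Ne.symm h)]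

theorem pv_getD_replicate {α : Type} (m i : Nat) (d : α) :
    (List.replicate m d).getD i d = d := by
  simp [List.getD_eq_getElem?_getD, List.getElem?_replicate]
  split <;> rfl

-- ---------- pvIdx / parN bounds ----------
theorem pvIdx_le (hl : List Int) (hp : Pre_build_leaves_list hl) (p : Int) (hmem : p ∈ hl) :
    pvIdx (pvM hl) p ≤ hl.length := by
  obtain ⟨h1, h2⟩ := hp p hmem
  unfold pvIdx pvM
  split <;> omega

theorem parN_le (hl : List Int) (hp : Pre_build_leaves_list hl) (v : Nat) :
    parN hl v ≤ hl.length := by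
  unfold parN
  split
  · omega
  · by_cases h : v - 1 < hl.length
    · rw [List.getD_eq_getElem _ _ h]
      exact pvIdx_le hl hp _ (List.getElem_mem h)
    · rw [List.getD_eq_default _ _ (by omega)]
      unfold pvIdx pvM; simp

-- ---------- build-tree characterization ----------
theorem pvBuildTree_fold_getD (hl : List Int) (l : List (Int × Nat)) (start : List (List Int))
    (hb : ∀ p ∈ l, pvIdx (hl.length + 1) p.1 < start.length) (c : Nat) :
    ((l.foldl (fun tl pc =>
        let j := pvIdx (hl.length + 1) pc.1
        tl.set j ((tl.getD j []) ++ [((pc.2 : Int) + 1)])) start).getD c []) =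
    start.getD c [] ++ (l.filter (fun p => pvIdx (hl.length + 1) p.1 = c)).map (fun p => ((p.2 : Int) + 1)) := by
  induction l generalizing start with
  | nil => simp
  | cons p t ih =>
    simp only [List.foldl_cons]
    have hlen : (start.set (pvIdx (hl.length + 1) p.1)
        ((start.getD (pvIdx (hl.length + 1) p.1) []) ++ [((p.2 : Int) + 1)])).length = start.length := by
      simp
    rw [ih _ (by intro q hq; rw [hlen]; exact hb q (List.mem_cons_of_mem _ hq))]
    by_cases hc : pvIdx (hl.length + 1) p.1 = c
    · subst hc
      rw [pv_getD_set_self _ _ _ _ (hb p (List.mem_cons_self))]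
      simp [List.filter_cons]
    · rw [pv_getD_set_ne _ _ _ _ _ (Ne.symm hc)]
      simp [List.filter_cons, hc]

theorem chI_eq (hl : List Int) (hp : Pre_build_leaves_list hl) (c : Nat) :
    chI hl c = (hl.zipIdx.filter (fun p => pvIdx (hl.length + 1) p.1 = c)).map (fun p => ((p.2 : Int) + 1)) := by
  unfold chI pvBuildTree
  rw [pvBuildTree_fold_getD hl _ _ (by
    intro p hp2
    rw [List.length_replicate]
    have hmem : p.1 ∈ hl := List.fst_mem_of_mem_zipIdx hp2
    have := pvIdx_le hl hp p.1 hmem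
    unfold pvM at this; omega)]
  rw [pv_getD_replicate]
  simp


-- ---------- children-list membership ----------
theorem mem_chI (hl : List Int) (hp : Pre_build_leaves_list hl) (c : Nat) (x : Int) :
    x ∈ chI hl c ↔ ∃ w : Nat, 1 ≤ w ∧ w ≤ hl.length ∧ parN hl w = c ∧ x = (w : Int) := by
  rw [chI_eq hl hp]
  simp only [List.mem_map, List.mem_filter]
  constructor
  · rintro ⟨p, ⟨hz, hf⟩, rfl⟩
    obtain ⟨hlt, hval⟩ := List.mem_zipIdx' hz
    refine ⟨p.2 + 1, by omega, by omega, ?_, by push_cast; ring⟩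
    unfold parN
    rw [if_neg (by omega)]
    simp only [Nat.add_sub_cancel]
    rw [List.getD_eq_getElem _ _ hlt, ← hval]
    unfold pvM
    exact of_decide_eq_true hf
  · rintro ⟨w, h1, h2, hpar, rfl⟩
    have hlt : w - 1 < hl.length := by omega
    refine ⟨(hl[w-1], w - 1), ⟨?_, ?_⟩, ?_⟩
    · rw [List.mem_zipIdx_iff_getElem?]
      simp [List.getElem?_eq_getElem hlt]
    · simp only [decide_eq_true_eq]
      unfold parN at hpar
      rw [if_neg (by omega)] at hpar
      rw [List.getD_eq_getElem _ _ hlt] at hpar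
      exact hpar
    · simp; omega

theorem nodup_zipIdx (hl : List Int) : hl.zipIdx.Nodup := by
  have h := List.zipIdx_map_snd 0 hl
  have : (List.map Prod.snd hl.zipIdx).Nodup := by rw [h]; exact List.nodup_range'
  exact this.of_map _

theorem nodup_chI (hl : List Int) (hp : Pre_build_leaves_list hl) (c : Nat) :
    (chI hl c).Nodup := by
  rw [chI_eq hl hp]
  refine List.Nodup.map_on ?_ (List.filter_sublist.nodup (nodup_zipIdx hl))
  rintro ⟨x1, x2⟩ hx ⟨y1, y2⟩ hy hxy
  have hx' := List.mem_zipIdx' (List.mem_of_mem_filter hx)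
  have hy' := List.mem_zipIdx' (List.mem_of_mem_filter hy)
  simp only at hx' hy' hxy
  have h2 : x2 = y2 := by omega
  subst h2
  have : x1 = y1 := by rw [hx'.2, hy'.2]
  rw [this]

theorem mem_chN (hl : List Int) (hp : Pre_build_leaves_list hl) (c : Nat) (w : Nat) :
    w ∈ chN hl c ↔ 1 ≤ w ∧ w ≤ hl.length ∧ parN hl w = c := by
  unfold chN
  simp only [List.mem_map]
  constructor
  · rintro ⟨x, hx, rfl⟩
    obtain ⟨w', h1, h2, h3, rfl⟩ := (mem_chI hl hp c x).1 hx
    simpa using ⟨h1, h2, h3⟩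
  · rintro ⟨h1, h2, h3⟩
    exact ⟨(w : Int), (mem_chI hl hp c w).2 ⟨w, h1, h2, h3, rfl⟩, by simp⟩

theorem nodup_chN (hl : List Int) (hp : Pre_build_leaves_list hl) (c : Nat) :
    (chN hl c).Nodup := by
  refine List.Nodup.map_on ?_ (nodup_chI hl hp c)
  intro x hx y hy hxy
  obtain ⟨wx, h1x, _, _, rfl⟩ := (mem_chI hl hp c x).1 hx
  obtain ⟨wy, h1y, _, _, rfl⟩ := (mem_chI hl hp c y).1 hy
  simp at hxy; omega

theorem chI_cast (hl : List Int) (hp : Pre_build_leaves_list hl) (c : Nat) :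
    chI hl c = (chN hl c).map Int.ofNat := by
  unfold chN
  calc chI hl c = (chI hl c).map (fun x => Int.ofNat x.toNat) := by
        refine ((List.map_congr_left ?_).trans (List.map_id _)).symm
        intro x hx
        obtain ⟨w, h1, _, _, rfl⟩ := (mem_chI hl hp c x).1 hx
        simp
    _ = ((chI hl c).map Int.toNat).map Int.ofNat := by rw [List.map_map]; rfl

-- ---------- reach / dep ----------
theorem reach_zero (hl : List Int) : Reach hl 0 := ⟨0, rfl⟩

theorem dep_spec (hl : List Int) {v : Nat} (h : Reach hl v) :
    (parN hl)^[dep hl v] v = 0 ∧ ∀ j < dep hl v, (parN hl)^[j] v ≠ 0 := by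
  unfold dep
  rw [dif_pos h]
  exact ⟨Nat.find_spec h, fun j hj => Nat.find_min h hj⟩

theorem dep_le' (hl : List Int) {v m' : Nat} (h : Reach hl v) (hm : (parN hl)^[m'] v = 0) :
    dep hl v ≤ m' := by
  unfold dep
  rw [dif_pos h]
  exact Nat.find_le hm

theorem iter_le (hl : List Int) (hp : Pre_build_leaves_list hl) (v i : Nat) (hi : 1 ≤ i) :
    (parN hl)^[i] v ≤ hl.length := by
  obtain ⟨j, rfl⟩ : ∃ j, i = j + 1 := ⟨i - 1, by omega⟩
  rw [Function.iterate_succ_apply']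
  exact parN_le hl hp _

theorem dep_le (hl : List Int) (hp : Pre_build_leaves_list hl) {v : Nat} (h : Reach hl v)
    (hv : v ≤ hl.length) : dep hl v ≤ hl.length := by
  by_contra hk
  push_neg at hk
  set k := dep hl v with hkdef
  have hspec := dep_spec hl h
  -- the chain iter 0 v, …, iter k v is injective into [0, hl.length]
  have hinj : Set.InjOn (fun i => (parN hl)^[i] v) ↑(Finset.range (k + 1)) := by
    intro a ha b hb hab
    simp only [Finset.coe_range, Set.mem_Iio] at ha hb
    by_contra hne
    have hab' : (parN hl)^[a] v = (parN hl)^[b] v := hab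
    rcases Nat.lt_or_ge a b with hlt | hge
    · have h1 : (parN hl)^[k - b + a] v = (parN hl)^[k] v := by
        rw [Function.iterate_add_apply, hab', ← Function.iterate_add_apply,
          show k - b + b = k by omega]
      exact hspec.2 (k - b + a) (by omega) (by rw [h1]; exact hspec.1)
    · have hlt2 : b < a := by omega
      have h1 : (parN hl)^[k - a + b] v = (parN hl)^[k] v := by
        rw [Function.iterate_add_apply, hab'.symm, ← Function.iterate_add_apply,
          show k - a + a = k by omega]
      exact hspec.2 (k - a + b) (by omega) (by rw [h1]; exact hspec.1)
  have hmaps : Set.MapsTo (fun i => (parN hl)^[i] v) ↑(Finset.range (k + 1)) ↑(Finset.range (hl.length + 1)) := by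
    intro i hi
    simp only [Finset.coe_range, Set.mem_Iio] at hi ⊢
    rcases Nat.eq_zero_or_pos i with rfl | hpos
    · simpa using by omega
    · have := iter_le hl hp v i hpos; omega
  have := Finset.card_le_card_of_injOn _ hmaps hinj
  simp at this
  omega

theorem dep_child (hl : List Int) (hp : Pre_build_leaves_list hl) {v c : Nat} (hv : Reach hl v)
    (hc : parN hl c = v) (h0 : c ≠ 0) : Reach hl c ∧ dep hl c = dep hl v + 1 := by
  have hrc : Reach hl c := by
    refine ⟨dep hl v + 1, ?_⟩
    rw [Function.iterate_succ_apply, hc]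
    exact (dep_spec hl hv).1
  have hle : dep hl c ≤ dep hl v + 1 := by
    apply dep_le' hl hrc
    rw [Function.iterate_succ_apply, hc]
    exact (dep_spec hl hv).1
  have h1 : 1 ≤ dep hl c := by
    rcases Nat.eq_zero_or_pos (dep hl c) with h0' | h
    · exfalso
      have hs := (dep_spec hl hrc).1
      rw [h0'] at hs
      exact h0 hs
    · exact h
  have hge : dep hl v ≤ dep hl c - 1 := by
    have h2 : (parN hl)^[dep hl c - 1] v = 0 := by
      have := (dep_spec hl hrc).1
      rw [show dep hl c = (dep hl c - 1) + 1 by omega, Function.iterate_succ_apply, hc] at this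
      exact this
    exact dep_le' hl hv h2
  exact ⟨hrc, by omega⟩


-- ---------- Fv / LvS / stS ----------
theorem Fv_pos (hl : List Int) (hp : Pre_build_leaves_list hl) {v : Nat} (h : Reach hl v)
    (hv : v ≤ hl.length) : 1 ≤ Fv hl v := by
  have := dep_le hl hp h hv
  unfold Fv pvM; omega

theorem Fv_child (hl : List Int) (hp : Pre_build_leaves_list hl) {v c : Nat} (hrv : Reach hl v)
    (hv : v ≤ hl.length) (hc : c ∈ chN hl v) :
    Reach hl c ∧ c ≤ hl.length ∧ 1 ≤ c ∧ Fv hl c = Fv hl v - 1 ∧ dep hl c = dep hl v + 1 := by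
  obtain ⟨h1, h2, h3⟩ := (mem_chN hl hp v c).1 hc
  obtain ⟨hrc, hdc⟩ := dep_child hl hp hrv h3 (by omega)
  have hdv := dep_le hl hp hrv hv
  refine ⟨hrc, h2, h1, ?_, hdc⟩
  unfold Fv pvM
  omega

theorem chN_nil_iff (hl : List Int) (v : Nat) : chN hl v = [] ↔ chI hl v = [] := by
  unfold chN
  simp

theorem chI_len_pos (hl : List Int) (v : Nat) : ((chI hl v).length > 0) ↔ chN hl v ≠ [] := by
  unfold chN
  cases chI hl v <;> simp

theorem subF_succ (hl : List Int) (f v : Nat) :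
    subF hl (f + 1) v = if chN hl v = [] then [(v : Int)] else ((chN hl v).map (subF hl f)).flatten := rfl

theorem stF_succ (hl : List Int) (f v : Nat) :
    stF hl (f + 1) v = v :: ((chN hl v).map (stF hl f)).flatten := rfl

theorem LvS_leaf (hl : List Int) (hp : Pre_build_leaves_list hl) {v : Nat} (hrv : Reach hl v)
    (hv : v ≤ hl.length) (h : chN hl v = []) : LvS hl v = [(v : Int)] := by
  have h1 := Fv_pos hl hp hrv hv
  unfold LvS
  rw [show Fv hl v = (Fv hl v - 1) + 1 by omega, subF_succ, if_pos h]

theorem LvS_node (hl : List Int) (hp : Pre_build_leaves_list hl) {v : Nat} (hrv : Reach hl v)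
    (hv : v ≤ hl.length) (h : chN hl v ≠ []) :
    LvS hl v = ((chN hl v).map (LvS hl)).flatten := by
  have h1 := Fv_pos hl hp hrv hv
  unfold LvS
  rw [show Fv hl v = (Fv hl v - 1) + 1 by omega, subF_succ, if_neg h]
  congr 1
  refine List.map_congr_left ?_
  intro c hc
  obtain ⟨hrc, hcn, _, hfc, _⟩ := Fv_child hl hp hrv hv hc
  rw [← hfc]

theorem stS_eq (hl : List Int) (hp : Pre_build_leaves_list hl) {v : Nat} (hrv : Reach hl v)
    (hv : v ≤ hl.length) : stS hl v = v :: ((chN hl v).map (stS hl)).flatten := by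
  have h1 := Fv_pos hl hp hrv hv
  unfold stS
  rw [show Fv hl v = (Fv hl v - 1) + 1 by omega, stF_succ]
  congr 2
  refine List.map_congr_left ?_
  intro c hc
  obtain ⟨hrc, hcn, _, hfc, _⟩ := Fv_child hl hp hrv hv hc
  rw [← hfc]

theorem szS_eq (hl : List Int) (hp : Pre_build_leaves_list hl) {v : Nat} (hrv : Reach hl v)
    (hv : v ≤ hl.length) : szS hl v = 1 + ((chN hl v).map (szS hl)).sum := by
  unfold szS
  rw [stS_eq hl hp hrv hv]
  simp only [List.length_cons, List.length_flatten, List.map_map]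
  rw [Nat.add_comm]
  rfl

theorem szS_pos (hl : List Int) (hp : Pre_build_leaves_list hl) {v : Nat} (hrv : Reach hl v)
    (hv : v ≤ hl.length) : 1 ≤ szS hl v := by
  rw [szS_eq hl hp hrv hv]; omega

theorem self_mem_stS (hl : List Int) (hp : Pre_build_leaves_list hl) {v : Nat} (hrv : Reach hl v)
    (hv : v ≤ hl.length) : v ∈ stS hl v := by
  rw [stS_eq hl hp hrv hv]; exact List.mem_cons_self

theorem mem_stS (hl : List Int) (hp : Pre_build_leaves_list hl) :
    ∀ K v, Fv hl v ≤ K → Reach hl v → v ≤ hl.length →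
      ∀ w ∈ stS hl v, Reach hl w ∧ w ≤ hl.length ∧ dep hl v ≤ dep hl w ∧
        (parN hl)^[dep hl w - dep hl v] w = v := by
  intro K
  induction K using Nat.strong_induction_on with
  | _ K IH =>
    intro v hK hrv hv w hw
    rw [stS_eq hl hp hrv hv] at hw
    rcases List.mem_cons.1 hw with rfl | hw'
    · exact ⟨hrv, hv, le_refl _, by simp⟩
    · rw [List.mem_flatten] at hw'
      obtain ⟨l, hl', hwl⟩ := hw'
      rw [List.mem_map] at hl'
      obtain ⟨c, hc, rfl⟩ := hl'
      obtain ⟨hrc, hcn, hc1, hfc, hdc⟩ := Fv_child hl hp hrv hv hc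
      have hKpos := Fv_pos hl hp hrv hv
      obtain ⟨hrw, hwn, hdcw, hchain⟩ := IH (K - 1) (by omega) c (by omega) hrc hcn w hwl
      refine ⟨hrw, hwn, by omega, ?_⟩
      rw [show dep hl w - dep hl v = (dep hl w - dep hl c) + 1 by omega,
        Function.iterate_succ_apply', hchain]
      exact ((mem_chN hl hp v c).1 hc).2.2

theorem mem_stS_conv (hl : List Int) (hp : Pre_build_leaves_list hl) :
    ∀ j w v, Reach hl v → v ≤ hl.length → w ≤ hl.length → (parN hl)^[j] w = v →
      w ∈ stS hl v := by
  intro j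
  induction j using Nat.strong_induction_on with
  | _ j IH =>
    intro w v hrv hv hw hchain
    rcases Nat.eq_zero_or_pos j with rfl | hj
    · simp at hchain
      subst hchain
      exact self_mem_stS hl hp hrv hv
    · obtain ⟨j', rfl⟩ : ∃ j', j = j' + 1 := ⟨j - 1, by omega⟩
      set u := (parN hl)^[j'] w with hu
      have hpu : parN hl u = v := by
        rw [hu, ← Function.iterate_succ_apply' (parN hl) j' w]
        exact hchain
      have hun : u ≤ hl.length := by
        rcases Nat.eq_zero_or_pos j' with rfl | hj'
        · simpa [hu] using hw
        · exact iter_le hl hp w j' hj'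
      by_cases hu0 : u = 0
      · have hv0 : v = 0 := by
          rw [← hpu, hu0]
          unfold parN; simp
        subst hv0
        exact IH j' (by omega) w 0 hrv hv hw (by rw [← hu0, hu])
      · have hru : Reach hl u := by
          refine ⟨dep hl v + 1, ?_⟩
          rw [Function.iterate_succ_apply, hpu]
          exact (dep_spec hl hrv).1
        have hcu : u ∈ chN hl v := (mem_chN hl hp v u).2 ⟨by omega, hun, hpu⟩
        have hwin : w ∈ stS hl u := IH j' (by omega) w u hru hun hw rfl
        rw [stS_eq hl hp hrv hv]
        refine List.mem_cons_of_mem _ ?_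
        rw [List.mem_flatten]
        exact ⟨stS hl u, List.mem_map.2 ⟨u, hcu, rfl⟩, hwin⟩

theorem stS_disjoint (hl : List Int) (hp : Pre_build_leaves_list hl) {v c1 c2 : Nat}
    (hrv : Reach hl v) (hv : v ≤ hl.length) (h1 : c1 ∈ chN hl v) (h2 : c2 ∈ chN hl v)
    (hne : c1 ≠ c2) : List.Disjoint (stS hl c1) (stS hl c2) := by
  intro w hw1 hw2
  obtain ⟨hr1, hn1, _, hf1, hd1⟩ := Fv_child hl hp hrv hv h1
  obtain ⟨hr2, hn2, _, hf2, hd2⟩ := Fv_child hl hp hrv hv h2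
  obtain ⟨_, _, hle1, hch1⟩ := mem_stS hl hp (Fv hl c1) c1 (le_refl _) hr1 hn1 w hw1
  obtain ⟨_, _, hle2, hch2⟩ := mem_stS hl hp (Fv hl c2) c2 (le_refl _) hr2 hn2 w hw2
  apply hne
  rw [← hch1, ← hch2, hd1, hd2]

theorem not_self_mem_child (hl : List Int) (hp : Pre_build_leaves_list hl) {v c : Nat}
    (hrv : Reach hl v) (hv : v ≤ hl.length) (hc : c ∈ chN hl v) : v ∉ stS hl c := by
  intro hmem
  obtain ⟨hrc, hcn, _, hfc, hdc⟩ := Fv_child hl hp hrv hv hc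
  obtain ⟨_, _, hle, _⟩ := mem_stS hl hp (Fv hl c) c (le_refl _) hrc hcn v hmem
  omega

theorem nodup_stS (hl : List Int) (hp : Pre_build_leaves_list hl) :
    ∀ K v, Fv hl v ≤ K → Reach hl v → v ≤ hl.length → (stS hl v).Nodup := by
  intro K
  induction K using Nat.strong_induction_on with
  | _ K IH =>
    intro v hK hrv hv
    have hKpos := Fv_pos hl hp hrv hv
    rw [stS_eq hl hp hrv hv]
    rw [List.nodup_cons]
    constructor
    · intro hvmem
      rw [List.mem_flatten] at hvmem
      obtain ⟨l, hl', hvl⟩ := hvmem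
      rw [List.mem_map] at hl'
      obtain ⟨c, hc, rfl⟩ := hl'
      exact not_self_mem_child hl hp hrv hv hc hvl
    · rw [List.nodup_flatten]
      constructor
      · intro l hl'
        rw [List.mem_map] at hl'
        obtain ⟨c, hc, rfl⟩ := hl'
        obtain ⟨hrc, hcn, _, hfc, _⟩ := Fv_child hl hp hrv hv hc
        exact IH (K - 1) (by omega) c (by omega) hrc hcn
      · rw [List.pairwise_map]
        refine List.Pairwise.imp_of_mem ?_ (nodup_chN hl hp v)
        intro c1 c2 hc1 hc2 hne
        exact stS_disjoint hl hp hrv hv hc1 hc2 hne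

theorem szS_le (hl : List Int) (hp : Pre_build_leaves_list hl) {v : Nat} (hrv : Reach hl v)
    (hv : v ≤ hl.length) : szS hl v ≤ hl.length + 1 := by
  unfold szS
  have hnd := nodup_stS hl hp (Fv hl v) v (le_refl _) hrv hv
  have hsub : ∀ w ∈ stS hl v, w ∈ List.range (hl.length + 1) := by
    intro w hw
    obtain ⟨_, hwn, _, _⟩ := mem_stS hl hp (Fv hl v) v (le_refl _) hrv hv w hw
    rw [List.mem_range]; omega
  have h1 : (stS hl v).toFinset.card = (stS hl v).length := List.toFinset_card_of_nodup hnd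
  have h2 : (stS hl v).toFinset ⊆ (List.range (hl.length + 1)).toFinset := by
    intro w hw
    rw [List.mem_toFinset] at hw ⊢
    exact hsub w hw
  have := Finset.card_le_card h2
  rw [h1, List.toFinset_card_of_nodup List.nodup_range, List.length_range] at this
  exact this


-- ---------- loop-shape helpers ----------
theorem pv_foldl_append {α : Type} (g : α → List Int) (cs : List α) (init : List Int) :
    cs.foldl (fun a c => a ++ g c) init = init ++ (cs.map g).flatten := by
  induction cs generalizing init with
  | nil => simp
  | cons c t ih => simp [ih, List.append_assoc]

theorem pv_revpush (l : List Int) (st : List (Int × Bool)) :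
    l.reverse.foldl (fun st c => (c, false) :: st) st = l.map (fun c => (c, false)) ++ st := by
  induction l generalizing st with
  | nil => simp
  | cons c t ih =>
    simp only [List.reverse_cons, List.foldl_append, List.foldl_cons, List.foldl_nil, List.map_cons]
    rw [ih]
    simp

theorem pvDFS_nil (children : List (List Int)) (f : Nat) (up out : List (List Int)) :
    pvDFS children f [] up out = (up, out) := by
  cases f <;> rfl

theorem pv_extend_fold (cs : List Int) (lv : List (List Int)) (j : Nat) (hj : j < lv.length)
    (hne : ∀ i ∈ cs, i.toNat ≠ j) :
    cs.foldl (fun lv i => lv.set j ((lv.getD j []) ++ (lv.getD i.toNat []))) lv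
      = lv.set j ((lv.getD j []) ++ (cs.map (fun i => lv.getD i.toNat [])).flatten) := by
  induction cs generalizing lv with
  | nil =>
    simp only [List.foldl_nil, List.map_nil, List.flatten_nil, List.append_nil]
    rw [List.getD_eq_getElem _ _ hj, List.set_getElem_self]
  | cons c t ih =>
    simp only [List.foldl_cons, List.map_cons, List.flatten_cons]
    rw [ih _ (by simpa using hj) (fun i hi => hne i (List.mem_cons_of_mem _ hi))]
    rw [List.set_set]
    have hmap : List.map (fun i => (lv.set j (lv.getD j [] ++ lv.getD c.toNat [])).getD i.toNat []) t
        = List.map (fun i => lv.getD i.toNat []) t := by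
      refine List.map_congr_left ?_
      intro i hi
      rw [pv_getD_set_ne _ _ _ _ _ (hne i (List.mem_cons_of_mem _ hi))]
    rw [pv_getD_set_self _ _ _ _ hj, hmap, List.append_assoc]

theorem pvExtend_closed (tree : List (List Int)) (lv : List (List Int)) (node : Int)
    (hnode : node.toNat < lv.length)
    (hne : ∀ i ∈ tree.getD node.toNat [], i.toNat ≠ node.toNat) :
    pvExtend tree lv node =
      lv.set node.toNat ((lv.getD node.toNat []) ++
        ((tree.getD node.toNat []).map (fun i => lv.getD i.toNat [])).flatten) := by
  unfold pvExtend
  exact pv_extend_fold _ _ _ hnode hne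


-- ---------- the DFS machine computes LvS (B side) ----------
theorem dfs_aux (hl : List Int) (hp : Pre_build_leaves_list hl) :
    ∀ K (cs : List Int),
    (∀ c ∈ cs, 0 ≤ c ∧ c.toNat ≤ hl.length ∧ Reach hl c.toNat ∧ Fv hl c.toNat ≤ K) →
    ((cs.map (fun c => stS hl c.toNat)).flatten).Nodup →
    ∀ (fuel : Nat) (stack : List (Int × Bool)) (up out : List (List Int)),
    2 * ((cs.map (fun c => szS hl c.toNat)).sum) ≤ fuel →
    up.length = hl.length + 1 → out.length = hl.length + 1 →
    ∃ up' out',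
      pvDFS (pvBuildTree hl) fuel (cs.map (fun c => (c, false)) ++ stack) up out
        = pvDFS (pvBuildTree hl) (fuel - 2 * ((cs.map (fun c => szS hl c.toNat)).sum)) stack up' out' ∧
      up'.length = hl.length + 1 ∧ out'.length = hl.length + 1 ∧
      (∀ w ∈ (cs.map (fun c => stS hl c.toNat)).flatten,
        up'.getD w [] = LvS hl w ∧
        out'.getD w [] = (if chN hl w = [] then [(w : Int)] else LvS hl w ++ [(w : Int)])) ∧
      (∀ w : Nat, w ∉ (cs.map (fun c => stS hl c.toNat)).flatten →
        up'.getD w [] = up.getD w [] ∧ out'.getD w [] = out.getD w []) := by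
  intro K
  induction K using Nat.strong_induction_on with
  | _ K IHK =>
    intro cs
    induction cs with
    | nil =>
      intro _ _ fuel stack up out hf hu ho
      refine ⟨up, out, by simp, hu, ho, by simp, by simp⟩
    | cons c cs' IHcs =>
      intro Hc Hnd fuel stack up out hf hu ho
      obtain ⟨hc0, hcn, hrc, hcK⟩ := Hc c List.mem_cons_self
      have hFc1 : 1 ≤ Fv hl c.toNat := Fv_pos hl hp hrc hcn
      have hK1 : 1 ≤ K := le_trans hFc1 hcK
      have hszc : 1 ≤ szS hl c.toNat := szS_pos hl hp hrc hcn
      have hflat : (((c :: cs').map (fun x => stS hl x.toNat)).flatten)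
          = stS hl c.toNat ++ ((cs'.map (fun x => stS hl x.toNat)).flatten) := by simp
      rw [hflat] at Hnd
      have hndS : (stS hl c.toNat).Nodup := (List.nodup_append.1 Hnd).1
      have hndN' : ((cs'.map (fun x => stS hl x.toNat)).flatten).Nodup := (List.nodup_append.1 Hnd).2.1
      have hdisj : ∀ w ∈ stS hl c.toNat, w ∉ ((cs'.map (fun x => stS hl x.toNat)).flatten) := by
        have h := (List.nodup_append.1 Hnd).2.2
        intro w hw hw2
        exact h w hw w hw2 rfl
      have hsum : (((c :: cs').map (fun x => szS hl x.toNat)).sum)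
          = szS hl c.toNat + ((cs'.map (fun x => szS hl x.toNat)).sum) := by simp
      rw [hsum] at hf
      obtain ⟨f, rfl⟩ : ∃ f, fuel = f + 1 := ⟨fuel - 1, by omega⟩
      -- step 1: pop (c, false), push the children and (c, true)
      have hstep1 : pvDFS (pvBuildTree hl) (f + 1) (((c :: cs').map (fun x => (x, false))) ++ stack) up out
          = pvDFS (pvBuildTree hl) f
              ((chI hl c.toNat).map (fun x => (x, false)) ++ ((c, true) :: (cs'.map (fun x => (x, false)) ++ stack))) up out := by
        simp only [List.map_cons, List.cons_append, pvDFS]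
        rw [show ((pvBuildTree hl).getD c.toNat []) = chI hl c.toNat from rfl, pv_revpush]
        simp
      -- children facts
      have hch : ∀ x ∈ chI hl c.toNat, 0 ≤ x ∧ x.toNat ≤ hl.length ∧ Reach hl x.toNat ∧ Fv hl x.toNat ≤ K - 1 := by
        intro x hx
        obtain ⟨w, h1, h2, h3, rfl⟩ := (mem_chI hl hp _ x).1 hx
        have hw : w ∈ chN hl c.toNat := (mem_chN hl hp _ w).2 ⟨h1, h2, h3⟩
        obtain ⟨hrw, hwn, _, hfw, _⟩ := Fv_child hl hp hrc hcn hw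
        simp only [Int.toNat_natCast]
        exact ⟨by positivity, hwn, hrw, by omega⟩
      have hmapstS : (chI hl c.toNat).map (fun x => stS hl x.toNat) = (chN hl c.toNat).map (stS hl) := by
        rw [chI_cast hl hp, List.map_map]
        simp [Function.comp_def]
      have hmapszS : (chI hl c.toNat).map (fun x => szS hl x.toNat) = (chN hl c.toNat).map (szS hl) := by
        rw [chI_cast hl hp, List.map_map]
        simp [Function.comp_def]
      have hstSc : stS hl c.toNat = c.toNat :: ((chN hl c.toNat).map (stS hl)).flatten :=
        stS_eq hl hp hrc hcn
      have hndch : (((chI hl c.toNat).map (fun x => stS hl x.toNat)).flatten).Nodup := by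
        rw [hmapstS]
        have := hndS
        rw [hstSc] at this
        exact (List.nodup_cons.1 this).2
      have hszSc := szS_eq hl hp hrc hcn
      have hsum_ch : ((chI hl c.toNat).map (fun x => szS hl x.toNat)).sum = szS hl c.toNat - 1 := by
        rw [hmapszS]; omega
      have hf_ch : 2 * ((chI hl c.toNat).map (fun x => szS hl x.toNat)).sum ≤ f := by
        rw [hsum_ch]; omega
      obtain ⟨up1, out1, heq1, hu1, ho1, hdone1, hfr1⟩ :=
        IHK (K - 1) (by omega) (chI hl c.toNat) hch hndch f
          ((c, true) :: (cs'.map (fun x => (x, false)) ++ stack)) up out hf_ch hu ho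
      rw [hmapstS] at hdone1 hfr1
      have hcnm : c.toNat < up1.length := by omega
      have hcnm' : c.toNat < out1.length := by omega
      have hgpos : 1 ≤ f - 2 * ((chI hl c.toNat).map (fun x => szS hl x.toNat)).sum := by
        rw [hsum_ch]; omega
      obtain ⟨g', hg'⟩ : ∃ g', f - 2 * ((chI hl c.toNat).map (fun x => szS hl x.toNat)).sum = g' + 1 :=
        ⟨f - 2 * ((chI hl c.toNat).map (fun x => szS hl x.toNat)).sum - 1, by omega⟩
      have hg'val : g' = f + 1 - 2 * szS hl c.toNat := by
        rw [hsum_ch] at hg'; omega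
      have hselfnot : c.toNat ∉ ((chN hl c.toNat).map (stS hl)).flatten := by
        have h := hndS
        rw [hstSc] at h
        exact (List.nodup_cons.1 h).1
      by_cases hleaf : chN hl c.toNat = []
      · -- leaf node
        have hcsc : chI hl c.toNat = [] := (chN_nil_iff hl _).1 hleaf
        have hstep2 : pvDFS (pvBuildTree hl) (g' + 1)
              ((c, true) :: (cs'.map (fun x => (x, false)) ++ stack)) up1 out1
            = pvDFS (pvBuildTree hl) g' (cs'.map (fun x => (x, false)) ++ stack)
                (up1.set c.toNat [c]) (out1.set c.toNat [c]) := by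
          simp only [pvDFS]
          rw [show ((pvBuildTree hl).getD c.toNat []) = chI hl c.toNat from rfl, hcsc]
          simp
        have hfg : 2 * ((cs'.map (fun x => szS hl x.toNat)).sum) ≤ g' := by omega
        obtain ⟨up', out', heq2, hu', ho', hdone2, hfr2⟩ :=
          IHcs (fun x hx => Hc x (List.mem_cons_of_mem _ hx)) hndN' g'
            stack (up1.set c.toNat [c]) (out1.set c.toNat [c]) hfg (by simpa using hu1) (by simpa using ho1)
        refine ⟨up', out', ?_, hu', ho', ?_, ?_⟩
        · rw [hstep1, heq1, hg', hstep2, heq2]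
          congr 1
          omega
        · intro w hw
          simp only [List.map_cons, List.flatten_cons] at hw
          rcases List.mem_append.1 hw with hwS | hwN
          · -- w ∈ stS c.toNat = [c.toNat]
            have hwc : w = c.toNat := by
              rw [hstSc, hleaf] at hwS
              simpa using hwS
            rw [hwc]
            have hnotN : c.toNat ∉ ((cs'.map (fun x => stS hl x.toNat)).flatten) :=
              hdisj c.toNat (self_mem_stS hl hp hrc hcn)
            obtain ⟨hfu, hfo⟩ := hfr2 c.toNat hnotN
            rw [hfu, hfo, pv_getD_set_self _ _ _ _ hcnm, pv_getD_set_self _ _ _ _ hcnm']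
            have hcast : ((c.toNat : Int)) = c := Int.toNat_of_nonneg hc0
            rw [LvS_leaf hl hp hrc hcn hleaf, if_pos hleaf, hcast]
            exact ⟨rfl, rfl⟩
          · exact hdone2 w hwN
        · intro w hw
          simp only [List.map_cons, List.flatten_cons] at hw
          have hwS : w ∉ stS hl c.toNat := fun h => hw (List.mem_append.2 (Or.inl h))
          have hwN : w ∉ ((cs'.map (fun x => stS hl x.toNat)).flatten) :=
            fun h => hw (List.mem_append.2 (Or.inr h))
          have hwc : w ≠ c.toNat := fun h => hwS (by rw [h]; exact self_mem_stS hl hp hrc hcn)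
          obtain ⟨hfu, hfo⟩ := hfr2 w hwN
          rw [hfu, hfo, pv_getD_set_ne _ _ _ _ _ hwc, pv_getD_set_ne _ _ _ _ _ hwc]
          exact hfr1 w (by simp [hleaf])
      · -- internal node
        have hcscne : (chI hl c.toNat).length > 0 := (chI_len_pos hl _).2 hleaf
        have hacc : (chI hl c.toNat).foldl (fun acc x => acc ++ up1.getD x.toNat []) []
            = LvS hl c.toNat := by
          rw [pv_foldl_append (fun x : Int => up1.getD x.toNat []) (chI hl c.toNat) []]
          simp only [List.nil_append]
          rw [chI_cast hl hp, List.map_map]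
          have hmapval : ((chN hl c.toNat).map ((fun x => up1.getD x.toNat []) ∘ Int.ofNat))
              = (chN hl c.toNat).map (LvS hl) := by
            refine List.map_congr_left ?_
            intro w hw
            simp only [Function.comp]
            obtain ⟨hrw, hwn, _, _, _⟩ := Fv_child hl hp hrc hcn hw
            have hwin : w ∈ ((chN hl c.toNat).map (stS hl)).flatten := by
              rw [List.mem_flatten]
              exact ⟨stS hl w, List.mem_map.2 ⟨w, hw, rfl⟩, self_mem_stS hl hp hrw hwn⟩
            simpa using (hdone1 w hwin).1
          rw [hmapval, ← LvS_node hl hp hrc hcn hleaf]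
        have hstep2 : pvDFS (pvBuildTree hl) (g' + 1)
              ((c, true) :: (cs'.map (fun x => (x, false)) ++ stack)) up1 out1
            = pvDFS (pvBuildTree hl) g' (cs'.map (fun x => (x, false)) ++ stack)
                (up1.set c.toNat (LvS hl c.toNat)) (out1.set c.toNat (LvS hl c.toNat ++ [c])) := by
          simp only [pvDFS]
          rw [show ((pvBuildTree hl).getD c.toNat []) = chI hl c.toNat from rfl]
          rw [hacc, if_pos hcscne]
          simp
        have hfg : 2 * ((cs'.map (fun x => szS hl x.toNat)).sum) ≤ g' := by omega
        obtain ⟨up', out', heq2, hu', ho', hdone2, hfr2⟩ :=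
          IHcs (fun x hx => Hc x (List.mem_cons_of_mem _ hx)) hndN' g'
            stack (up1.set c.toNat (LvS hl c.toNat)) (out1.set c.toNat (LvS hl c.toNat ++ [c]))
            hfg (by simpa using hu1) (by simpa using ho1)
        refine ⟨up', out', ?_, hu', ho', ?_, ?_⟩
        · rw [hstep1, heq1, hg', hstep2, heq2]
          congr 1
          omega
        · intro w hw
          simp only [List.map_cons, List.flatten_cons] at hw
          rcases List.mem_append.1 hw with hwS | hwN
          · rw [hstSc] at hwS
            rcases List.mem_cons.1 hwS with hwc | hwF
            · rw [hwc]
              have hnotN : c.toNat ∉ ((cs'.map (fun x => stS hl x.toNat)).flatten) :=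
                hdisj c.toNat (self_mem_stS hl hp hrc hcn)
              obtain ⟨hfu, hfo⟩ := hfr2 c.toNat hnotN
              rw [hfu, hfo, pv_getD_set_self _ _ _ _ hcnm, pv_getD_set_self _ _ _ _ hcnm']
              have hcast : ((c.toNat : Int)) = c := Int.toNat_of_nonneg hc0
              rw [if_neg hleaf, hcast]
              exact ⟨rfl, rfl⟩
            · have hwne : w ≠ c.toNat := fun h => hselfnot (h ▸ hwF)
              have hnotN : w ∉ ((cs'.map (fun x => stS hl x.toNat)).flatten) :=
                hdisj w (by rw [hstSc]; exact List.mem_cons_of_mem _ hwF)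
              obtain ⟨hfu, hfo⟩ := hfr2 w hnotN
              rw [hfu, hfo, pv_getD_set_ne _ _ _ _ _ hwne, pv_getD_set_ne _ _ _ _ _ hwne]
              exact hdone1 w hwF
          · exact hdone2 w hwN
        · intro w hw
          simp only [List.map_cons, List.flatten_cons] at hw
          have hwS : w ∉ stS hl c.toNat := fun h => hw (List.mem_append.2 (Or.inl h))
          have hwN : w ∉ ((cs'.map (fun x => stS hl x.toNat)).flatten) :=
            fun h => hw (List.mem_append.2 (Or.inr h))
          have hwc : w ≠ c.toNat := fun h => hwS (by rw [h]; exact self_mem_stS hl hp hrc hcn)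
          have hwF : w ∉ ((chN hl c.toNat).map (stS hl)).flatten := by
            intro h
            exact hwS (by rw [hstSc]; exact List.mem_cons_of_mem _ h)
          obtain ⟨hfu, hfo⟩ := hfr2 w hwN
          obtain ⟨hfu1, hfo1⟩ := hfr1 w hwF
          rw [hfu, hfo, pv_getD_set_ne _ _ _ _ _ hwc, pv_getD_set_ne _ _ _ _ _ hwc, hfu1, hfo1]
          exact ⟨rfl, rfl⟩


-- ---------- the BFS collects reachable nodes level by level (A side, phase 1) ----------
set_option maxHeartbeats 1000000 in
theorem bfs_aux (hl : List Int) (hp : Pre_build_leaves_list hl) :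
    ∀ (fuel : Nat) (que lvl : List Int) (lv : List (List Int)),
    (∀ q ∈ que, 0 ≤ q ∧ q.toNat ≤ hl.length ∧ Reach hl q.toNat) →
    List.Pairwise (fun a b => dep hl a.toNat ≤ dep hl b.toNat) que →
    (∀ a ∈ que, ∀ b ∈ que, dep hl a.toNat ≤ dep hl b.toNat + 1) →
    ((que.map (fun q => stS hl q.toNat)).flatten).Nodup →
    ((que.map (fun q => szS hl q.toNat)).sum) ≤ fuel →
    lv.length = hl.length + 1 →
    ∃ extra lv',
      pvBFS (pvBuildTree hl) fuel que lvl lv = (lvl ++ extra, lv') ∧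
      (∀ x : Int, x ∈ extra ↔ (0 ≤ x ∧ x.toNat ∈ (que.map (fun q => stS hl q.toNat)).flatten ∧ chN hl x.toNat ≠ [])) ∧
      extra.Nodup ∧
      List.Pairwise (fun a b => dep hl a.toNat ≤ dep hl b.toNat) extra ∧
      lv'.length = hl.length + 1 ∧
      (∀ w : Nat, w ∈ (que.map (fun q => stS hl q.toNat)).flatten → chN hl w = [] →
        lv'.getD w [] = lv.getD w [] ++ [(w : Int)]) ∧
      (∀ w : Nat, (w ∉ (que.map (fun q => stS hl q.toNat)).flatten ∨ chN hl w ≠ []) →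
        lv'.getD w [] = lv.getD w []) := by
  intro fuel
  induction fuel with
  | zero =>
    intro que lvl lv Hq Hs Hb Hnd Hf Hl
    cases que with
    | cons cur rest =>
      exfalso
      obtain ⟨h0, hn, hr⟩ := Hq cur List.mem_cons_self
      have := szS_pos hl hp hr hn
      simp at Hf
      omega
    | nil =>
      refine ⟨[], lv, by simp [pvBFS], by simp, by simp, by simp, Hl, by simp, fun w _ => rfl⟩
  | succ f IH =>
    intro que lvl lv Hq Hs Hb Hnd Hf Hl
    cases que with
    | nil =>
      refine ⟨[], lv, by simp [pvBFS], by simp, by simp, by simp, Hl, by simp, fun w _ => rfl⟩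
    | cons cur rest =>
      obtain ⟨hc0, hcn, hrc⟩ := Hq cur List.mem_cons_self
      have hcurm : cur.toNat < lv.length := by omega
      have hszc : 1 ≤ szS hl cur.toNat := szS_pos hl hp hrc hcn
      have hstSc : stS hl cur.toNat = cur.toNat :: ((chN hl cur.toNat).map (stS hl)).flatten :=
        stS_eq hl hp hrc hcn
      have hszSc := szS_eq hl hp hrc hcn
      have hmapstS : (chI hl cur.toNat).map (fun x => stS hl x.toNat) = (chN hl cur.toNat).map (stS hl) := by
        rw [chI_cast hl hp, List.map_map]
        simp [Function.comp_def]
      have hmapszS : (chI hl cur.toNat).map (fun x => szS hl x.toNat) = (chN hl cur.toNat).map (szS hl) := by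
        rw [chI_cast hl hp, List.map_map]
        simp [Function.comp_def]
      have hflat : ((cur :: rest).map (fun q => stS hl q.toNat)).flatten
          = stS hl cur.toNat ++ (rest.map (fun q => stS hl q.toNat)).flatten := by simp
      rw [hflat] at Hnd
      have hsum : ((cur :: rest).map (fun q => szS hl q.toNat)).sum
          = szS hl cur.toNat + (rest.map (fun q => szS hl q.toNat)).sum := by simp
      rw [hsum] at Hf
      have hsort_tail : List.Pairwise (fun a b => dep hl a.toNat ≤ dep hl b.toNat) rest :=
        (List.pairwise_cons.1 Hs).2
      have hsort_head : ∀ b ∈ rest, dep hl cur.toNat ≤ dep hl b.toNat :=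
        (List.pairwise_cons.1 Hs).1
      by_cases hleaf : chN hl cur.toNat = []
      · -- leaf: mark it in lv and continue with rest
        have hcsc : chI hl cur.toNat = [] := (chN_nil_iff hl _).1 hleaf
        have hstep : pvBFS (pvBuildTree hl) (f + 1) (cur :: rest) lvl lv
            = pvBFS (pvBuildTree hl) f rest lvl
                (lv.set cur.toNat ((lv.getD cur.toNat []) ++ [cur])) := by
          simp only [pvBFS]
          rw [show ((pvBuildTree hl).getD cur.toNat []) = chI hl cur.toNat from rfl, hcsc]
          simp
        have hstScL : stS hl cur.toNat = [cur.toNat] := by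
          rw [hstSc, hleaf]; simp
        rw [hstScL] at Hnd
        have hndrest : ((rest.map (fun q => stS hl q.toNat)).flatten).Nodup :=
          (List.nodup_append.1 Hnd).2.1
        have hcurnot : cur.toNat ∉ (rest.map (fun q => stS hl q.toNat)).flatten := by
          have h := (List.nodup_append.1 Hnd).2.2
          intro hmem
          exact h cur.toNat List.mem_cons_self cur.toNat hmem rfl
        obtain ⟨extra, lv', heq, hiff, hnd, hsorted, hlen, hleafc, hfr⟩ :=
          IH rest lvl (lv.set cur.toNat ((lv.getD cur.toNat []) ++ [cur]))
            (fun q hq => Hq q (List.mem_cons_of_mem _ hq)) hsort_tail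
            (fun a ha b hb => Hb a (List.mem_cons_of_mem _ ha) b (List.mem_cons_of_mem _ hb))
            hndrest (by omega) (by simpa using Hl)
        refine ⟨extra, lv', by rw [hstep, heq], ?_, hnd, hsorted, hlen, ?_, ?_⟩
        · intro x
          rw [hiff, hflat, hstScL]
          constructor
          · rintro ⟨h1, h2, h3⟩
            exact ⟨h1, List.mem_append.2 (Or.inr h2), h3⟩
          · rintro ⟨h1, h2, h3⟩
            rcases List.mem_append.1 h2 with h2' | h2'
            · exfalso
              have : x.toNat = cur.toNat := by simpa using h2'
              rw [this] at h3
              exact h3 hleaf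
            · exact ⟨h1, h2', h3⟩
        · intro w hw hwleaf
          rw [hflat, hstScL] at hw
          rcases List.mem_append.1 hw with hw' | hw'
          · have hwc : w = cur.toNat := by simpa using hw'
            rw [hwc]
            have h1 := hfr cur.toNat (Or.inl hcurnot)
            rw [h1, pv_getD_set_self _ _ _ _ hcurm]
            rw [show ((cur.toNat : Int)) = cur from Int.toNat_of_nonneg hc0]
          · have hwne : w ≠ cur.toNat := fun h => hcurnot (h ▸ hw')
            rw [hleafc w hw' hwleaf, pv_getD_set_ne _ _ _ _ _ hwne]
        · intro w hw
          rw [hflat, hstScL] at hw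
          have hwne : w ≠ cur.toNat := by
            rcases hw with hw | hw
            · intro h
              exact hw (List.mem_append.2 (Or.inl (by rw [h]; exact List.mem_singleton.2 rfl)))
            · intro h
              rw [h] at hw
              exact hw hleaf
          have : w ∉ (rest.map (fun q => stS hl q.toNat)).flatten ∨ chN hl w ≠ [] := by
            rcases hw with hw | hw
            · exact Or.inl (fun h => hw (List.mem_append.2 (Or.inr h)))
            · exact Or.inr hw
          rw [hfr w this, pv_getD_set_ne _ _ _ _ _ hwne]
      · -- internal: enqueue children, record in level list
        have hcscne : (chI hl cur.toNat).length > 0 := (chI_len_pos hl _).2 hleaf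
        have hstep : pvBFS (pvBuildTree hl) (f + 1) (cur :: rest) lvl lv
            = pvBFS (pvBuildTree hl) f (rest ++ chI hl cur.toNat) (lvl ++ [cur]) lv := by
          simp only [pvBFS]
          rw [show ((pvBuildTree hl).getD cur.toNat []) = chI hl cur.toNat from rfl]
          rw [if_pos hcscne]
        -- children properties
        have hch : ∀ x ∈ chI hl cur.toNat, 0 ≤ x ∧ x.toNat ≤ hl.length ∧ Reach hl x.toNat ∧
            dep hl x.toNat = dep hl cur.toNat + 1 := by
          intro x hx
          obtain ⟨w, h1, h2, h3, rfl⟩ := (mem_chI hl hp _ x).1 hx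
          have hw : w ∈ chN hl cur.toNat := (mem_chN hl hp _ w).2 ⟨h1, h2, h3⟩
          obtain ⟨hrw, hwn, _, _, hdw⟩ := Fv_child hl hp hrc hcn hw
          simp only [Int.toNat_natCast]
          exact ⟨by positivity, hwn, hrw, hdw⟩
        have hrestdep : ∀ b ∈ rest, dep hl b.toNat ≤ dep hl cur.toNat + 1 := fun b hb =>
          Hb b (List.mem_cons_of_mem _ hb) cur List.mem_cons_self
        have Hq' : ∀ q ∈ rest ++ chI hl cur.toNat, 0 ≤ q ∧ q.toNat ≤ hl.length ∧ Reach hl q.toNat := by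
          intro q hq
          rcases List.mem_append.1 hq with hq' | hq'
          · exact Hq q (List.mem_cons_of_mem _ hq')
          · obtain ⟨a, b, c, _⟩ := hch q hq'
            exact ⟨a, b, c⟩
        have Hs' : List.Pairwise (fun a b => dep hl a.toNat ≤ dep hl b.toNat) (rest ++ chI hl cur.toNat) := by
          rw [List.pairwise_append]
          refine ⟨hsort_tail, ?_, ?_⟩
          · refine List.pairwise_of_forall_mem_list ?_
            intro a ha b hb
            rw [(hch a ha).2.2.2, (hch b hb).2.2.2]
          · intro a ha b hb
            rw [(hch b hb).2.2.2]
            exact hrestdep a ha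
        have Hb' : ∀ a ∈ rest ++ chI hl cur.toNat, ∀ b ∈ rest ++ chI hl cur.toNat,
            dep hl a.toNat ≤ dep hl b.toNat + 1 := by
          intro a ha b hb
          have hda : dep hl a.toNat ≤ dep hl cur.toNat + 1 := by
            rcases List.mem_append.1 ha with ha' | ha'
            · exact hrestdep a ha'
            · rw [(hch a ha').2.2.2]
          have hdb : dep hl cur.toNat ≤ dep hl b.toNat := by
            rcases List.mem_append.1 hb with hb' | hb'
            · exact hsort_head b hb'
            · rw [(hch b hb').2.2.2]; omega
          omega
        have hndflat : (((rest ++ chI hl cur.toNat).map (fun q => stS hl q.toNat)).flatten).Nodup := by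
          rw [List.map_append, List.flatten_append, hmapstS]
          have h1 : (stS hl cur.toNat ++ (rest.map (fun q => stS hl q.toNat)).flatten).Nodup := Hnd
          rw [hstSc, List.cons_append] at h1
          have h2 := (List.nodup_cons.1 h1).2
          exact (List.perm_append_comm.nodup_iff).2 h2
        have hsum' : ((rest ++ chI hl cur.toNat).map (fun q => szS hl q.toNat)).sum
            = (rest.map (fun q => szS hl q.toNat)).sum + (szS hl cur.toNat - 1) := by
          rw [List.map_append, List.sum_append, hmapszS]
          omega
        obtain ⟨extra', lv', heq, hiff, hnd, hsorted, hlen, hleafc, hfr⟩ :=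
          IH (rest ++ chI hl cur.toNat) (lvl ++ [cur]) lv Hq' Hs' Hb' hndflat
            (by rw [hsum']; omega) Hl
        -- memberships in the two pending-node multisets
        have hmemN : ∀ w : Nat, w ∈ ((cur :: rest).map (fun q => stS hl q.toNat)).flatten
            ↔ (w = cur.toNat ∨ w ∈ ((chN hl cur.toNat).map (stS hl)).flatten
                ∨ w ∈ (rest.map (fun q => stS hl q.toNat)).flatten) := by
          intro w
          rw [hflat, hstSc]
          simp only [List.mem_append, List.mem_cons]
          tauto
        have hmemN' : ∀ w : Nat, w ∈ ((rest ++ chI hl cur.toNat).map (fun q => stS hl q.toNat)).flatten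
            ↔ (w ∈ ((chN hl cur.toNat).map (stS hl)).flatten
                ∨ w ∈ (rest.map (fun q => stS hl q.toNat)).flatten) := by
          intro w
          rw [List.map_append, List.flatten_append, hmapstS]
          simp only [List.mem_append]
          tauto
        have hcurnotN' : cur.toNat ∉ ((rest ++ chI hl cur.toNat).map (fun q => stS hl q.toNat)).flatten := by
          rw [hmemN']
          have h1 : (stS hl cur.toNat ++ (rest.map (fun q => stS hl q.toNat)).flatten).Nodup := Hnd
          rw [hstSc, List.cons_append] at h1
          have := (List.nodup_cons.1 h1).1
          rw [List.mem_append] at this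
          tauto
        refine ⟨cur :: extra', lv', ?_, ?_, ?_, ?_, hlen, ?_, ?_⟩
        · rw [hstep, heq]
          simp
        · intro x
          rw [List.mem_cons, hiff, hmemN']
          constructor
          · rintro (rfl | ⟨h1, h2, h3⟩)
            · refine ⟨hc0, ?_, hleaf⟩
              rw [hmemN]
              exact Or.inl rfl
            · rw [hmemN]
              exact ⟨h1, by tauto, h3⟩
          · rintro ⟨h1, h2, h3⟩
            rw [hmemN] at h2
            rcases h2 with h2 | h2 | h2
            · left
              have : x.toNat = cur.toNat := h2
              rw [← Int.toNat_of_nonneg h1, ← Int.toNat_of_nonneg hc0, this]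
            · right; exact ⟨h1, by tauto, h3⟩
            · right; exact ⟨h1, by tauto, h3⟩
        · rw [List.nodup_cons]
          refine ⟨?_, hnd⟩
          intro hmem
          have := (hiff cur).1 hmem
          exact hcurnotN' this.2.1
        · rw [List.pairwise_cons]
          refine ⟨?_, hsorted⟩
          intro b hb
          obtain ⟨hb0, hbN, _⟩ := (hiff b).1 hb
          rw [hmemN'] at hbN
          rcases hbN with hbN | hbN
          · rw [List.mem_flatten] at hbN
            obtain ⟨l, hlmem, hbl⟩ := hbN
            rw [List.mem_map] at hlmem
            obtain ⟨q, hq, rfl⟩ := hlmem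
            obtain ⟨hrq, hqn, _, _, hdq⟩ := Fv_child hl hp hrc hcn hq
            obtain ⟨_, _, hdep, _⟩ := mem_stS hl hp (Fv hl q) q (le_refl _) hrq hqn b.toNat hbl
            omega
          · rw [List.mem_flatten] at hbN
            obtain ⟨l, hlmem, hbl⟩ := hbN
            rw [List.mem_map] at hlmem
            obtain ⟨q, hq, rfl⟩ := hlmem
            obtain ⟨hq0, hqn, hrq⟩ := Hq q (List.mem_cons_of_mem _ hq)
            obtain ⟨_, _, hdep, _⟩ := mem_stS hl hp (Fv hl q.toNat) q.toNat (le_refl _) hrq hqn b.toNat hbl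
            have := hsort_head q hq
            omega
        · intro w hw hwleaf
          rw [hmemN] at hw
          rcases hw with hw | hw | hw
          · exfalso
            rw [hw] at hwleaf
            exact hleaf hwleaf
          · exact hleafc w (by rw [hmemN']; tauto) hwleaf
          · exact hleafc w (by rw [hmemN']; tauto) hwleaf
        · intro w hw
          refine hfr w ?_
          rcases hw with hw | hw
          · left
            rw [hmemN'] at *
            rw [hmemN] at hw
            tauto
          · exact Or.inr hw


-- ---------- phase 2: the extend loop fills every internal reachable slot with LvS ----------
set_option maxHeartbeats 1000000 in
theorem phase2 (hl : List Int) (hp : Pre_build_leaves_list hl) :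
    ∀ (todo : List Int) (lv : List (List Int)),
    (∀ x ∈ todo, 0 ≤ x ∧ x.toNat ≤ hl.length ∧ Reach hl x.toNat ∧ chN hl x.toNat ≠ []) →
    todo.Nodup →
    List.Pairwise (fun a b => dep hl b.toNat ≤ dep hl a.toNat) todo →
    lv.length = hl.length + 1 →
    (∀ w : Nat, w ≤ hl.length → ¬ Reach hl w → lv.getD w [] = []) →
    (∀ w : Nat, w ≤ hl.length → Reach hl w → chN hl w = [] → lv.getD w [] = [(w : Int)]) →
    (∀ w : Nat, w ≤ hl.length → Reach hl w → chN hl w ≠ [] →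
        (((w : Int) ∈ todo → lv.getD w [] = []) ∧ ((w : Int) ∉ todo → lv.getD w [] = LvS hl w))) →
    ((todo.foldl (pvExtend (pvBuildTree hl)) lv).length = hl.length + 1 ∧
     (∀ w : Nat, w ≤ hl.length → ¬ Reach hl w →
        (todo.foldl (pvExtend (pvBuildTree hl)) lv).getD w [] = []) ∧
     (∀ w : Nat, w ≤ hl.length → Reach hl w → chN hl w = [] →
        (todo.foldl (pvExtend (pvBuildTree hl)) lv).getD w [] = [(w : Int)]) ∧
     (∀ w : Nat, w ≤ hl.length → Reach hl w → chN hl w ≠ [] →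
        (todo.foldl (pvExtend (pvBuildTree hl)) lv).getD w [] = LvS hl w)) := by
  intro todo
  induction todo with
  | nil =>
    intro lv H0 Hnd Hsort Hl H4 H5 H6
    refine ⟨Hl, H4, H5, ?_⟩
    intro w hw hr hint
    exact (H6 w hw hr hint).2 (by simp)
  | cons x t IH =>
    intro lv H0 Hnd Hsort Hl H4 H5 H6
    obtain ⟨hx0, hxn, hrx, hxint⟩ := H0 x List.mem_cons_self
    have hxm : x.toNat < lv.length := by omega
    have hxcast : ((x.toNat : Int)) = x := Int.toNat_of_nonneg hx0
    have hchne : ∀ i ∈ (pvBuildTree hl).getD x.toNat [], i.toNat ≠ x.toNat := by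
      intro i hi
      obtain ⟨w, h1, h2, h3, rfl⟩ := (mem_chI hl hp _ i).1 hi
      have hw : w ∈ chN hl x.toNat := (mem_chN hl hp _ w).2 ⟨h1, h2, h3⟩
      obtain ⟨_, _, _, _, hdw⟩ := Fv_child hl hp hrx hxn hw
      simp only [Int.ofNat_eq_natCast, Int.toNat_natCast]
      intro h
      rw [h] at hdw
      omega
    have hstep : pvExtend (pvBuildTree hl) lv x = lv.set x.toNat (LvS hl x.toNat) := by
      rw [pvExtend_closed _ _ _ hxm hchne]
      have hgd : lv.getD x.toNat [] = [] := (H6 x.toNat hxn hrx hxint).1 (by rw [hxcast]; exact List.mem_cons_self)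
      rw [hgd, List.nil_append]
      congr 1
      rw [show ((pvBuildTree hl).getD x.toNat []) = chI hl x.toNat from rfl]
      rw [chI_cast hl hp, List.map_map]
      have hmapval : ((chN hl x.toNat).map ((fun i : Int => lv.getD i.toNat []) ∘ Int.ofNat))
          = (chN hl x.toNat).map (LvS hl) := by
        refine List.map_congr_left ?_
        intro w hw
        simp only [Function.comp, Int.ofNat_eq_natCast, Int.toNat_natCast]
        obtain ⟨hrw, hwn, hw1, _, hdw⟩ := Fv_child hl hp hrx hxn hw
        by_cases hwleaf : chN hl w = []
        · rw [H5 w hwn hrw hwleaf, LvS_leaf hl hp hrw hwn hwleaf]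
        · refine (H6 w hwn hrw hwleaf).2 ?_
          intro hmem
          rcases List.mem_cons.1 hmem with hmem' | hmem'
          · have hwx : w = x.toNat := by rw [← hxcast] at hmem'; exact_mod_cast hmem'
            rw [hwx] at hdw
            omega
          · have := (List.pairwise_cons.1 Hsort).1 _ hmem'
            simp only [Int.toNat_natCast] at this
            omega
      rw [hmapval, ← LvS_node hl hp hrx hxn hxint]
    simp only [List.foldl_cons, hstep]
    have hxnotT : x ∉ t := (List.nodup_cons.1 Hnd).1
    refine IH (lv.set x.toNat (LvS hl x.toNat))
      (fun y hy => H0 y (List.mem_cons_of_mem _ hy))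
      (List.nodup_cons.1 Hnd).2 (List.pairwise_cons.1 Hsort).2 (by simpa using Hl) ?_ ?_ ?_
    · intro w hw hnr
      have hwne : w ≠ x.toNat := fun h => hnr (h ▸ hrx)
      rw [pv_getD_set_ne _ _ _ _ _ hwne]
      exact H4 w hw hnr
    · intro w hw hr hleafw
      have hwne : w ≠ x.toNat := fun h => hxint (by rw [← h]; exact hleafw)
      rw [pv_getD_set_ne _ _ _ _ _ hwne]
      exact H5 w hw hr hleafw
    · intro w hw hr hint
      constructor
      · intro hmem
        have hwne : w ≠ x.toNat := by
          intro h
          apply hxnotT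
          rw [← hxcast, ← h]
          exact hmem
        rw [pv_getD_set_ne _ _ _ _ _ hwne]
        exact (H6 w hw hr hint).1 (List.mem_cons_of_mem _ hmem)
      · intro hmem
        by_cases hwx : w = x.toNat
        · rw [hwx, pv_getD_set_self _ _ _ _ hxm]
        · rw [pv_getD_set_ne _ _ _ _ _ hwx]
          refine (H6 w hw hr hint).2 ?_
          intro hmem'
          rcases List.mem_cons.1 hmem' with h | h
          · exact hwx (by rw [← hxcast] at h; exact_mod_cast h)
          · exact hmem h
    
-- ---------- phase 3: append each node to its own slot ----------
theorem phase3 :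
    ∀ (todo : List Int) (lv : List (List Int)),
    (∀ x ∈ todo, 0 ≤ x ∧ x.toNat < lv.length) → todo.Nodup →
    ((todo.foldl (fun lv node => lv.set node.toNat ((lv.getD node.toNat []) ++ [node])) lv).length = lv.length ∧
     (∀ w : Nat, (w : Int) ∈ todo →
        (todo.foldl (fun lv node => lv.set node.toNat ((lv.getD node.toNat []) ++ [node])) lv).getD w []
          = lv.getD w [] ++ [(w : Int)]) ∧
     (∀ w : Nat, (w : Int) ∉ todo →
        (todo.foldl (fun lv node => lv.set node.toNat ((lv.getD node.toNat []) ++ [node])) lv).getD w []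
          = lv.getD w [])) := by
  intro todo
  induction todo with
  | nil =>
    intro lv _ _
    exact ⟨rfl, fun w hw => absurd hw (by simp), fun w _ => rfl⟩
  | cons x t IH =>
    intro lv H0 Hnd
    obtain ⟨hx0, hxm⟩ := H0 x List.mem_cons_self
    have hxcast : ((x.toNat : Int)) = x := Int.toNat_of_nonneg hx0
    have hxnotT : x ∉ t := (List.nodup_cons.1 Hnd).1
    simp only [List.foldl_cons]
    obtain ⟨hlen, hin, hout⟩ := IH (lv.set x.toNat ((lv.getD x.toNat []) ++ [x]))
      (fun y hy => ⟨(H0 y (List.mem_cons_of_mem _ hy)).1, by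
        simpa using (H0 y (List.mem_cons_of_mem _ hy)).2⟩)
      (List.nodup_cons.1 Hnd).2
    refine ⟨by simpa using hlen, ?_, ?_⟩
    · intro w hw
      rcases List.mem_cons.1 hw with hw' | hw'
      · have hwx : w = x.toNat := by rw [← hxcast] at hw'; exact_mod_cast hw'
        rw [hwx]
        rw [hout x.toNat (by rw [hxcast]; exact hxnotT)]
        rw [pv_getD_set_self _ _ _ _ hxm, hxcast]
      · have hwx : w ≠ x.toNat := by
          intro h
          apply hxnotT
          rw [← hxcast, ← h]
          exact hw'
        rw [hin w hw', pv_getD_set_ne _ _ _ _ _ hwx]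
    · intro w hw
      have hw1 : (w : Int) ∉ t := fun h => hw (List.mem_cons_of_mem _ h)
      have hwx : w ≠ x.toNat := by
        intro h
        exact hw (by rw [h, hxcast]; exact List.mem_cons_self)
      rw [hout w hw1, pv_getD_set_ne _ _ _ _ _ hwx]


-- ---------- final assembly ----------
noncomputable def ansS (hl : List Int) (w : Nat) : List Int :=
  @dite _ (Reach hl w) (Classical.propDecidable _)
    (fun _ => if chN hl w = [] then [(w : Int)] else LvS hl w ++ [(w : Int)]) (fun _ => [])

theorem pv_list_ext (l1 l2 : List (List Int)) (h : l1.length = l2.length)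
    (hg : ∀ w, w < l1.length → l1.getD w [] = l2.getD w []) : l1 = l2 :=
  List.ext_getElem h (fun i h1 h2 => by
    have := hg i h1
    rwa [List.getD_eq_getElem _ _ h1, List.getD_eq_getElem _ _ h2] at this)

theorem stS0_mem (hl : List Int) (hp : Pre_build_leaves_list hl) (w : Nat) (hw : w ≤ hl.length) :
    w ∈ stS hl 0 ↔ Reach hl w := by
  constructor
  · intro h
    exact (mem_stS hl hp (Fv hl 0) 0 (le_refl _) (reach_zero hl) (by simp) w h).1
  · intro h
    exact mem_stS_conv hl hp (dep hl w) w 0 (reach_zero hl) (by simp) hw (dep_spec hl h).1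

theorem final_char_B (hl : List Int) (hp : Pre_build_leaves_list hl) :
    ∃ res : List (List Int), build_leaves_list_alt hl = res.drop 1 ∧
      res.length = hl.length + 1 ∧ (∀ w : Nat, w ≤ hl.length → res.getD w [] = ansS hl w) := by
  obtain ⟨up', out', heq, hu', ho', hdone, hfr⟩ :=
    dfs_aux hl hp (Fv hl 0) [(0 : Int)]
      (by
        intro c hc
        simp only [List.mem_singleton] at hc
        subst hc
        exact ⟨le_refl _, by simp, reach_zero hl, le_refl _⟩)
      (by simpa using nodup_stS hl hp (Fv hl 0) 0 (le_refl _) (reach_zero hl) (by simp))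
      (2 * hl.length + 2) [] (List.replicate (hl.length + 1) ([] : List Int))
      (List.replicate (hl.length + 1) ([] : List Int))
      (by
        have := szS_le hl hp (reach_zero hl) (Nat.zero_le _)
        simp only [List.map_cons, List.map_nil, List.sum_cons, List.sum_nil, Int.toNat_zero]
        omega)
      (by simp) (by simp)
  rw [pvDFS_nil] at heq
  refine ⟨out', ?_, ho', ?_⟩
  · have hdef : build_leaves_list_alt hl
        = (pvDFS (pvBuildTree hl) (2 * hl.length + 2) [((0 : Int), false)]
            (List.replicate (hl.length + 1) ([] : List Int))
            (List.replicate (hl.length + 1) ([] : List Int))).2.drop 1 := rfl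
    rw [hdef]
    have : ([((0 : Int), false)] : List (Int × Bool))
        = ([(0 : Int)].map (fun c => (c, false))) ++ [] := by simp
    rw [this, heq]
  · intro w hw
    by_cases hr : Reach hl w
    · have hmem : w ∈ ([(0 : Int)].map (fun c => stS hl c.toNat)).flatten := by
        simpa using (stS0_mem hl hp w hw).2 hr
      have := (hdone w hmem).2
      rw [this]
      unfold ansS
      rw [dif_pos hr]
    · have hmem : w ∉ ([(0 : Int)].map (fun c => stS hl c.toNat)).flatten := by
        intro h
        exact hr ((stS0_mem hl hp w hw).1 (by simpa using h))
      rw [(hfr w hmem).2, pv_getD_replicate]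
      unfold ansS
      rw [dif_neg hr]

set_option maxHeartbeats 1000000 in
theorem final_char_A (hl : List Int) (hp : Pre_build_leaves_list hl) :
    ∃ res : List (List Int), build_leaves_list hl = res.drop 1 ∧
      res.length = hl.length + 1 ∧ (∀ w : Nat, w ≤ hl.length → res.getD w [] = ansS hl w) := by
  obtain ⟨extra, lv', heq, hiff, hnd, hsorted, hlen, hleafc, hfr⟩ :=
    bfs_aux hl hp (hl.length + 1) [(0 : Int)] [] (List.replicate (hl.length + 1) ([] : List Int))
      (by
        intro q hq
        simp only [List.mem_singleton] at hq
        subst hq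
        exact ⟨le_refl _, by simp, reach_zero hl⟩)
      (List.pairwise_singleton _ _)
      (by
        intro a ha b hb
        simp only [List.mem_singleton] at ha hb
        subst ha; subst hb; omega)
      (by simpa using nodup_stS hl hp (Fv hl 0) 0 (le_refl _) (reach_zero hl) (by simp))
      (by
        have := szS_le hl hp (reach_zero hl) (Nat.zero_le _)
        simp only [List.map_cons, List.map_nil, List.sum_cons, List.sum_nil, Int.toNat_zero]
        omega)
      (by simp)
  simp only [List.nil_append] at heq
  -- membership facts about extra
  have hextra : ∀ x ∈ extra, 0 ≤ x ∧ x.toNat ≤ hl.length ∧ Reach hl x.toNat ∧ chN hl x.toNat ≠ [] := by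
    intro x hx
    obtain ⟨h0, hmem, hint⟩ := (hiff x).1 hx
    obtain ⟨hr, hn, _, _⟩ := mem_stS hl hp (Fv hl 0) 0 (le_refl _) (reach_zero hl) (by simp)
      x.toNat (by simpa using hmem)
    exact ⟨h0, hn, hr, hint⟩
  have hintodo : ∀ w : Nat, w ≤ hl.length → Reach hl w → chN hl w ≠ [] → (w : Int) ∈ extra := by
    intro w hw hr hint
    refine (hiff (w : Int)).2 ⟨by positivity, ?_, by simpa using hint⟩
    simpa using (stS0_mem hl hp w hw).2 hr
  -- phase 2
  obtain ⟨hlen2, hA4, hA5, hA6⟩ :=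
    phase2 hl hp extra.reverse lv'
      (fun x hx => hextra x (List.mem_reverse.1 hx))
      (List.nodup_reverse.2 hnd)
      (List.pairwise_reverse.2 hsorted)
      hlen
      (by
        intro w hw hnr
        have hmem : w ∉ ([(0 : Int)].map (fun q => stS hl q.toNat)).flatten := by
          intro h
          exact hnr ((stS0_mem hl hp w hw).1 (by simpa using h))
        rw [hfr w (Or.inl hmem), pv_getD_replicate])
      (by
        intro w hw hr hleafw
        have hmem : w ∈ ([(0 : Int)].map (fun q => stS hl q.toNat)).flatten := by
          simpa using (stS0_mem hl hp w hw).2 hr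
        rw [hleafc w hmem hleafw, pv_getD_replicate, List.nil_append])
      (by
        intro w hw hr hint
        constructor
        · intro _
          rw [hfr w (Or.inr hint), pv_getD_replicate]
        · intro hnot
          exact absurd (List.mem_reverse.2 (hintodo w hw hr hint)) hnot)
  -- phase 3
  obtain ⟨hlen3, hin3, hout3⟩ :=
    phase3 extra.reverse (extra.reverse.foldl (pvExtend (pvBuildTree hl)) lv')
      (by
        intro x hx
        obtain ⟨h0, hn, _, _⟩ := hextra x (List.mem_reverse.1 hx)
        exact ⟨h0, by omega⟩)
      (List.nodup_reverse.2 hnd)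
  refine ⟨_, ?_, by rw [hlen3]; exact hlen2, ?_⟩
  · have hdef : build_leaves_list hl
        = ((pvBFS (pvBuildTree hl) (hl.length + 1) [0] [] (List.replicate (hl.length + 1) ([] : List Int))).1.reverse.foldl
            (fun lv node => lv.set node.toNat ((lv.getD node.toNat []) ++ [node]))
            ((pvBFS (pvBuildTree hl) (hl.length + 1) [0] [] (List.replicate (hl.length + 1) ([] : List Int))).1.reverse.foldl
              (pvExtend (pvBuildTree hl))
              (pvBFS (pvBuildTree hl) (hl.length + 1) [0] [] (List.replicate (hl.length + 1) ([] : List Int))).2)).drop 1 := rfl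
    rw [hdef, heq]
  · intro w hw
    by_cases hr : Reach hl w
    · by_cases hleafw : chN hl w = []
      · have hnot : (w : Int) ∉ extra.reverse := by
          intro h
          obtain ⟨_, _, _, hint⟩ := hextra _ (List.mem_reverse.1 h)
          rw [Int.toNat_natCast] at hint
          exact hint hleafw
        rw [hout3 w hnot, hA5 w hw hr hleafw]
        unfold ansS
        rw [dif_pos hr, if_pos hleafw]
      · have hmem : (w : Int) ∈ extra.reverse := List.mem_reverse.2 (hintodo w hw hr hleafw)
        rw [hin3 w hmem, hA6 w hw hr hleafw]
        unfold ansS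
        rw [dif_pos hr, if_neg hleafw]
    · have hnot : (w : Int) ∉ extra.reverse := by
        intro h
        obtain ⟨_, _, hrx, _⟩ := hextra _ (List.mem_reverse.1 h)
        rw [Int.toNat_natCast] at hrx
        exact hr hrx
      rw [hout3 w hnot, hA4 w hw hr]
      unfold ansS
      rw [dif_neg hr]

theorem build_leaves_list_spec : Claim_equal_build_leaves_list := by
  intro hl _ hp
  unfold Spec_build_leaves_list
  obtain ⟨resA, hA, hlA, hgA⟩ := final_char_A hl hp
  obtain ⟨resB, hB, hlB, hgB⟩ := final_char_B hl hp
  rw [hA, hB]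
  congr 1
  refine pv_list_ext _ _ (by omega) ?_
  intro w hw
  rw [hgA w (by omega), hgB w (by omega)]
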